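-- pv_equiv track=rewrite | github.com/AAEU-LPD/NSTAX | standalone_scripts/nrf_devkit/nrf_devkit_packet_simulator.py | revert_nibbles
-- ===== SOURCE A (Python) =====
-- def revert_nibbles(hex_string):
--     # Ensure the hex string length is even
--     if len(hex_string) % 2 != 0:
--         raise ValueError("Hex string length must be even.")
--
--     # Initialize the result string
--     result = ""
--
--     # Loop through the hex string two characters at a time
--     for i in range(0, len(hex_string), 2):
--         byte = hex_string[i:i+2]
--         # Swap the nibbles within the byte
--         swapped_byte = byte[1] + byte[0]
--         result += swapped_byte
--
--     return result
-- ===== SOURCE B (Python) =====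
-- def revert_nibbles(hex_string):
--     if len(hex_string) % 2 != 0:
--         raise ValueError("Hex string length must be even.")
--     odd = hex_string[1::2]
--     even = hex_string[0::2]
--     return ''.join(o + e for o, e in zip(odd, even))
-- ===== Notes on version B (the rewrite author's own statement) =====
-- stated objective: alternative
-- what changed: Replaced the byte-by-byte pair loop with accumulation by two strided slices (hex_string[1::2], hex_string[0::2]) interleaved via zip/join; the even-length guard with its ValueError is kept.
import Mathlib
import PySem

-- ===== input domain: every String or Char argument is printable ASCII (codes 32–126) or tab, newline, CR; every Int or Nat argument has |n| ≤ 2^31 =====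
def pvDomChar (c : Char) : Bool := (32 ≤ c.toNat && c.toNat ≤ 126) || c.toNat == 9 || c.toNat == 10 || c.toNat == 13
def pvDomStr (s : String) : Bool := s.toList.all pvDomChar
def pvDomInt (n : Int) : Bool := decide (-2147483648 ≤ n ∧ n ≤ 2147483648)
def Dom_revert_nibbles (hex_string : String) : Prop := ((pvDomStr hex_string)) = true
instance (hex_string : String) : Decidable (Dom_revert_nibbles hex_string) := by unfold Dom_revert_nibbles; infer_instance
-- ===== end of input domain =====

-- B swaps the nibbles of each byte by interleaving the two strided slices s[1::2] and s[0::2]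
-- instead of A's byte-by-byte pair loop with string accumulation (objective: alternative decomposition).

-- ===== PORT A =====
def revert_nibbles (hex_string : String) : String :=
  if hex_string.toList.length % 2 ≠ 0 then ""  -- Python raises ValueError here; excluded by Pre_
  else
    let cs := hex_string.toList
    let res := (PySem.List.pyRange 0 (cs.length : Int) 2).foldl
      (fun acc i =>
        let byte := PySem.List.slice cs (some i) (some (i + 2))
        -- byte[1] + byte[0]; the none (IndexError) branches are unreachable for even length
        match PySem.List.pyGet? byte 1, PySem.List.pyGet? byte 0 with
        | some b1, some b0 => acc ++ [b1, b0]
        | _, _ => acc) []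
    String.ofList res

-- ===== PORT B =====
def revert_nibbles_alt (hex_string : String) : String :=
  if hex_string.toList.length % 2 ≠ 0 then ""  -- Python raises ValueError here; excluded by Pre_
  else
    let cs := hex_string.toList
    let odd := (PySem.List.slice? cs (some 1) none 2).getD []   -- hex_string[1::2]
    let even := (PySem.List.slice? cs (some 0) none 2).getD []  -- hex_string[0::2]
    String.ofList ((odd.zip even).flatMap (fun p => [p.1, p.2]))

-- ===== PRECONDITION & SPEC =====
-- Pre_ excludes exactly the odd-length strings, on which A raises ValueError.
def Pre_revert_nibbles (hex_string : String) : Prop := hex_string.toList.length % 2 = 0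
instance (hex_string : String) : Decidable (Pre_revert_nibbles hex_string) := by unfold Pre_revert_nibbles; infer_instance
def pvWitness_revert_nibbles : String := "a1b2"

def Spec_revert_nibbles (hex_string : String) (out : String) : Prop := out = revert_nibbles_alt hex_string
instance (hex_string : String) (out : String) : Decidable (Spec_revert_nibbles hex_string out) := by unfold Spec_revert_nibbles; infer_instance

-- ===== CLAIM (what is proved, stated in full; the proofs are below) =====
def Claim_equal_revert_nibbles : Prop := ∀ (hex_string : String), Dom_revert_nibbles hex_string → Pre_revert_nibbles hex_string → Spec_revert_nibbles hex_string (revert_nibbles hex_string)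

-- ===== LEMMAS AND PROOFS =====

-- the common target: swap each adjacent pair of characters
def swapPairs : List Char → List Char
  | [] => []
  | [x] => [x]
  | x :: y :: t => y :: x :: swapPairs t

-- every other element, starting at the head (what a [a::2] slice extracts)
def stride2 : List Char → List Char
  | [] => []
  | x :: t => x :: stride2 (t.drop 1)
termination_by xs => xs.length
decreasing_by simp only [List.length_drop, List.length_cons]; omega

lemma core_filterMap (ys : List Char) :
    List.filterMap (fun k => ys[2*k]?) (List.range ((ys.length + 1) / 2)) = stride2 ys := by
  induction ys using stride2.induct with
  | case1 => simp [stride2]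
  | case2 x t ih =>
    have hc : (( (x :: t).length + 1) / 2) = ((t.drop 1).length + 1) / 2 + 1 := by
      simp only [List.length_cons, List.length_drop]; omega
    rw [hc, List.range_succ_eq_map, List.filterMap_cons, List.filterMap_map]
    have hstep : (fun k => (x :: t)[2*k]?) ∘ Nat.succ = fun k => (t.drop 1)[2*k]? := by
      funext k
      simp only [Function.comp_apply, List.getElem?_drop]
      rw [show 2 * k.succ = (1 + 2*k) + 1 by omega]
      rfl
    rw [hstep, ih]
    simp [stride2]

lemma slice?_two (xs : List Char) (a : Nat) :
    PySem.List.slice? xs (some (a : Int)) none 2 = some (stride2 (xs.drop a)) := by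
  unfold PySem.List.slice? PySem.List.sliceIndices
  simp only [if_neg (by norm_num : ¬ (2:Int) = 0), if_neg (by norm_num : ¬ (2:Int) < 0),
    if_pos (by norm_num : (0:Int) < 2), if_neg (by omega : ¬ ((a:Int)) < 0)]
  rw [show min (a:Int) (xs.length:Int) = ((min a xs.length : Nat) : Int) from (Nat.cast_min a xs.length).symm]
  have hdrop : xs.drop a = xs.drop (min a xs.length) := by
    rcases le_total a xs.length with h | h
    · rw [Nat.min_eq_left h]
    · rw [List.drop_eq_nil_of_le h, List.drop_eq_nil_of_le (by omega)]
  have hcount : (if ((min a xs.length : Nat) : Int) < (xs.length : Int)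
        then (((xs.length : Int) - ((min a xs.length : Nat) : Int) + 2 - 1) / 2).toNat else 0)
      = ((xs.drop (min a xs.length)).length + 1) / 2 := by
    rw [List.length_drop]; split_ifs with h <;> omega
  have hidx : (fun (k : Nat) => xs[(((min a xs.length : Nat) : Int) + 2 * (k : Int)).toNat]?)
      = fun (k : Nat) => (xs.drop (min a xs.length))[2*k]? := by
    funext k
    rw [List.getElem?_drop]
    congr 1
  rw [hdrop, hidx]
  simp only [hcount]
  exact congrArg some (core_filterMap _)

lemma foldA (cs : List Char) (m : Nat) (h : cs.length = 2 * m) (acc : List Char) :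
    (List.range m).foldl
      (fun acc k =>
        match PySem.List.pyGet? ((cs.drop (2*k)).take 2) 1,
              PySem.List.pyGet? ((cs.drop (2*k)).take 2) 0 with
        | some b1, some b0 => acc ++ [b1, b0]
        | _, _ => acc) acc = acc ++ swapPairs cs := by
  induction m generalizing cs acc with
  | zero =>
    have : cs = [] := List.eq_nil_of_length_eq_zero (by omega)
    simp [this, swapPairs]
  | succ m ih =>
    match cs, h with
    | x :: y :: t, h =>
      rw [List.range_succ_eq_map, List.foldl_cons, List.foldl_map]
      have h0 : ((x :: y :: t).drop (2*0)).take 2 = [x, y] := by simp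
      rw [h0]
      have hb : (fun (acc : List Char) (k : Nat) =>
          match PySem.List.pyGet? (((x :: y :: t).drop (2*(k+1))).take 2) 1,
                PySem.List.pyGet? (((x :: y :: t).drop (2*(k+1))).take 2) 0 with
          | some b1, some b0 => acc ++ [b1, b0]
          | _, _ => acc)
        = (fun (acc : List Char) (k : Nat) =>
          match PySem.List.pyGet? ((t.drop (2*k)).take 2) 1,
                PySem.List.pyGet? ((t.drop (2*k)).take 2) 0 with
          | some b1, some b0 => acc ++ [b1, b0]
          | _, _ => acc) := by
        funext acc k
        rw [show 2*(k+1) = 2+(2*k) by ring, ← List.drop_drop]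
        rfl
      have hmatch : (match PySem.List.pyGet? [x, y] 1, PySem.List.pyGet? [x, y] 0 with
          | some b1, some b0 => acc ++ [b1, b0]
          | _, _ => acc) = acc ++ [y, x] := by
        norm_num [PySem.List.pyGet?, PySem.List.pyIdx?]
      rw [hmatch, hb, ih t (by simp at h; omega) (acc ++ [y, x])]
      simp [swapPairs]

lemma zip_stride (cs : List Char) (m : Nat) (h : cs.length = 2 * m) :
    ((stride2 cs.tail).zip (stride2 cs)).flatMap (fun p => [p.1, p.2]) = swapPairs cs := by
  induction m generalizing cs with
  | zero =>
    have : cs = [] := List.eq_nil_of_length_eq_zero (by omega)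
    simp [this, stride2, swapPairs]
  | succ m ih =>
    match cs, h with
    | x :: y :: t, h =>
      rw [show (x :: y :: t).tail = y :: t from rfl, stride2, stride2]
      simp only [List.drop_one, List.tail_cons]
      rw [List.zip_cons_cons, List.flatMap_cons]
      rw [ih t (by simp at h; omega)]
      rfl

-- rewrite A's Int-indexed loop body into the Nat take/drop form of foldA
lemma bodyA (cs : List Char) :
    (fun (acc : List Char) (k : Nat) =>
      match PySem.List.pyGet? (PySem.List.slice cs (some ((0:Int) + 2 * (k:Int))) (some ((0:Int) + 2 * (k:Int) + 2))) 1,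
            PySem.List.pyGet? (PySem.List.slice cs (some ((0:Int) + 2 * (k:Int))) (some ((0:Int) + 2 * (k:Int) + 2))) 0 with
      | some b1, some b0 => acc ++ [b1, b0]
      | _, _ => acc)
    = (fun (acc : List Char) (k : Nat) =>
      match PySem.List.pyGet? ((cs.drop (2*k)).take 2) 1,
            PySem.List.pyGet? ((cs.drop (2*k)).take 2) 0 with
      | some b1, some b0 => acc ++ [b1, b0]
      | _, _ => acc) := by
  funext acc k
  have h1 : ((0:Int) + 2 * (k:Int)) = ((2*k : Nat) : Int) := by push_cast; ring
  simp only [h1]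
  rw [PySem.List.slice_toNat _ (by positivity) (by positivity)]
  simp only [Int.toNat_natCast]
  rw [show (((2*k : Nat) : Int) + 2).toNat - 2*k = 2 by omega]

-- ===== VERDICT (by name: the statement is the Claim_ definition above) =====
theorem revert_nibbles_spec : Claim_equal_revert_nibbles := by
  intro s _ hpre
  have hlen : s.toList.length % 2 = 0 := hpre
  obtain ⟨m, hm⟩ : ∃ m, s.toList.length = 2 * m :=
    ⟨s.toList.length / 2, by omega⟩
  simp only [Spec_revert_nibbles, revert_nibbles, revert_nibbles_alt, if_neg (by omega : ¬ s.toList.length % 2 ≠ 0)]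
  congr 1
  have s1 := slice?_two s.toList 1
  have s0 := slice?_two s.toList 0
  norm_num at s1 s0
  rw [s1, s0]
  simp only [Option.getD_some]
  rw [zip_stride s.toList m hm]
  rw [PySem.List.pyRange_of_pos 0 _ (by norm_num), List.foldl_map]
  have hcnt : (if (0:Int) < (s.toList.length : Int)
      then (((s.toList.length : Int) - 0 + 2 - 1) / 2).toNat else 0) = m := by
    split_ifs with h <;> omega
  rw [hcnt, bodyA s.toList, foldA s.toList m hm []]
  rfl
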